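-- pv_equiv track=rewrite | github.com/elvachiu/Python-Course | midterm/midterm.py | eliminate_locs
-- ===== SOURCE A (Python) =====
-- def eliminate_locs(locs): #try to eliminate the locations within the same pic
--     n = len(locs)
--     locs.sort()
--     for i in range(n-1):
--         index = []
--         for j in range(i+1, n):
--             if abs(locs[j][0]-locs[i][0])<=20:
--                 if abs(locs[j][1]-locs[i][1])<=20:
--                     index.append(j)
--             elif abs(locs[j][1]-locs[i][1])<=20:
--                 if abs(locs[j][0]-locs[i][0])<=20:
--                     index.append(j)
--             else: break
--         index.sort(reverse = True)
--         for k in index: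
--             locs.remove(locs[k])
--         n = len(locs)
--     return locs
-- ===== SOURCE B (Python) =====
-- def eliminate_locs(locs):  # sort, then one greedy pass with a spatial hash grid (cell size 20)
--     locs.sort()
--     if len(locs) <= 1:
--         return locs
--     kept = []
--     grid = {}
--     for p in locs:
--         cx, cy = p[0] // 20, p[1] // 20
--         hit = False
--         for dx in (-1, 0, 1):
--             for dy in (-1, 0, 1):
--                 q = grid.get((cx + dx, cy + dy))
--                 if q is not None and abs(p[0] - q[0]) <= 20 and abs(p[1] - q[1]) <= 20:
--                     hit = True
--         if not hit:
--             kept.append(p)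
--             grid[(cx, cy)] = p
--     locs[:] = kept
--     return locs
-- ===== Notes on version B (the rewrite author's own statement) =====
-- stated objective: alternative
-- what changed: A repeatedly rescans the sorted list and deletes conflicting points in place with list.remove per outer pivot; B makes one greedy pass over the sorted list keeping a spatial hash grid with cell size 20 (at most one kept point per cell), deciding each point with nine dictionary lookups instead of scan-and-remove passes.
import Mathlib
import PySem

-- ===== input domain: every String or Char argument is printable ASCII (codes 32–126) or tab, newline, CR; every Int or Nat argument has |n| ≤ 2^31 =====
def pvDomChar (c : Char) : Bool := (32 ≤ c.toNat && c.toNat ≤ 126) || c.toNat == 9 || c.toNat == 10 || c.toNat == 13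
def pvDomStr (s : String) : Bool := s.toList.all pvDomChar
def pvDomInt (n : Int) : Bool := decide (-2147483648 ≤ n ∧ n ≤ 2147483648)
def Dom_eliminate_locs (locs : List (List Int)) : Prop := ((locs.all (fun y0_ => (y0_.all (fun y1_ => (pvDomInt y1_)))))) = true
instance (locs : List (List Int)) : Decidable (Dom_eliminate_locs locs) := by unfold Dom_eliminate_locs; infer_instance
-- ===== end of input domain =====

-- B replaces A's repeated scan-and-remove passes over the list by one greedy pass over
-- the sorted points with a spatial hash grid (cell size 20) for the neighbour-conflict check.
-- Both the Python A and the Python B mutate the argument list in place (sort / rewrite);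
-- the equivalence proved here is about the RETURN value.

-- shared subscript helpers: p[0] and p[1] (total forms; Pre_ keeps them in range)
def pvx (p : List Int) : Int := PySem.List.pyGetD p 0 0
def pvy (p : List Int) : Int := PySem.List.pyGetD p 1 0

-- ===== PORT A =====
-- the inner j-loop: collect indices, 'else: break' returns what was collected so far
def elimScan (locs : List (List Int)) (pi_ : List Int) : List Int → List Int
  | [] => []
  | j :: js =>
    let pj := PySem.List.pyGetD locs j []
    if |pvx pj - pvx pi_| ≤ 20 then
      (if |pvy pj - pvy pi_| ≤ 20 then j :: elimScan locs pi_ js else elimScan locs pi_ js)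
    else if |pvy pj - pvy pi_| ≤ 20 then
      (if |pvx pj - pvx pi_| ≤ 20 then j :: elimScan locs pi_ js else elimScan locs pi_ js)
    else []

-- 'for k in index: locs.remove(locs[k])'
def elimRemove (locs : List (List Int)) (ks : List Int) : List (List Int) :=
  ks.foldl (fun L k => (PySem.List.remove? L (PySem.List.pyGetD L k [])).getD L) locs

-- one iteration of the outer i-loop
def elimStep (L : List (List Int)) (i : Int) : List (List Int) :=
  let index := elimScan L (PySem.List.pyGetD L i []) (PySem.List.pyRange (i + 1) (PySem.List.len L) 1)
  elimRemove L (PySem.List.sorted index (fun x => x) true)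

def eliminate_locs (locs : List (List Int)) : List (List Int) :=
  let locs := PySem.List.sorted locs (fun x => x) false
  (PySem.List.pyRange 0 (PySem.List.len locs - 1) 1).foldl elimStep locs

-- ===== PORT B =====
-- the nine neighbour cell offsets, in Source B's loop order
def pvNbrs : List (Int × Int) :=
  [(-1, -1), (-1, 0), (-1, 1), (0, -1), (0, 0), (0, 1), (1, -1), (1, 0), (1, 1)]

-- 'hit': is some kept point in a neighbouring grid cell within the 20-box of p?
def gridHit (grid : PySem.Dict (Int × Int) (List Int)) (px py cx cy : Int) : Bool :=
  pvNbrs.any (fun d =>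
    match grid.get? (cx + d.1, cy + d.2) with
    | none => false
    | some q => decide (|px - pvx q| ≤ 20) && decide (|py - pvy q| ≤ 20))

def elimAltLoop : List (List Int) → List (List Int) → PySem.Dict (Int × Int) (List Int) → List (List Int)
  | [], kept, _ => kept
  | p :: rest, kept, grid =>
    let px := pvx p
    let py := pvy p
    let cx := PySem.Int.floordiv px 20
    let cy := PySem.Int.floordiv py 20
    if gridHit grid px py cx cy then
      elimAltLoop rest kept grid
    else
      elimAltLoop rest (kept ++ [p]) (grid.insert (cx, cy) p)

def eliminate_locs_alt (locs : List (List Int)) : List (List Int) :=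
  let locs := PySem.List.sorted locs (fun x => x) false
  if PySem.List.len locs ≤ 1 then locs
  else elimAltLoop locs [] PySem.Dict.empty

-- ===== PRECONDITION & SPEC =====
-- Pre_ excludes exactly the inputs on which A raises IndexError (two or more points,
-- some point with fewer than two coordinates); A returns on every other input.
def Pre_eliminate_locs (locs : List (List Int)) : Prop :=
  locs.length ≤ 1 ∨ ∀ l ∈ locs, 2 ≤ l.length
instance (locs : List (List Int)) : Decidable (Pre_eliminate_locs locs) := by
  unfold Pre_eliminate_locs; infer_instance

def pvWitness_eliminate_locs : List (List Int) := [[0, 0], [100, 100], [105, 90]]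

def Spec_eliminate_locs (locs : List (List Int)) (out : List (List Int)) : Prop := out = eliminate_locs_alt locs
instance (locs : List (List Int)) (out : List (List Int)) : Decidable (Spec_eliminate_locs locs out) := by unfold Spec_eliminate_locs; infer_instance

-- ===== CLAIM (what is proved, stated in full; the proofs are below) =====
def Claim_equal_eliminate_locs : Prop := ∀ (locs : List (List Int)), Dom_eliminate_locs locs → Pre_eliminate_locs locs → Spec_eliminate_locs locs (eliminate_locs locs)

-- ===== LEMMAS AND PROOFS =====

-- the Chebyshev-20 conflict test, as a Bool
def conf (p q : List Int) : Bool :=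
  decide (|pvx p - pvx q| ≤ 20) && decide (|pvy p - pvy q| ≤ 20)

-- the abstract greedy filter both ports compute
def gGreedy (kept : List (List Int)) : List (List Int) → List (List Int)
  | [] => kept
  | p :: rest => if kept.any (fun q => conf p q) then gGreedy kept rest else gGreedy (kept ++ [p]) rest

def cellOf (p : List Int) : Int × Int :=
  (PySem.Int.floordiv (pvx p) 20, PySem.Int.floordiv (pvy p) 20)

-- ---- B-side: the grid loop is the greedy filter ----

def gridInv (kept : List (List Int)) (grid : PySem.Dict (Int × Int) (List Int)) : Prop :=
  (∀ q ∈ kept, grid.get? (cellOf q) = some q) ∧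
  (∀ c q, grid.get? c = some q → q ∈ kept ∧ c = cellOf q)

theorem floordiv_near (a b : Int) (h : |a - b| ≤ 20) :
    PySem.Int.floordiv b 20 = PySem.Int.floordiv a 20 - 1 ∨
    PySem.Int.floordiv b 20 = PySem.Int.floordiv a 20 ∨
    PySem.Int.floordiv b 20 = PySem.Int.floordiv a 20 + 1 := by
  rw [abs_le] at h
  rw [PySem.Int.floordiv_eq_ediv_of_pos (by omega), PySem.Int.floordiv_eq_ediv_of_pos (by omega)]
  omega

theorem gridHit_eq_any (kept : List (List Int)) (grid : PySem.Dict (Int × Int) (List Int))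
    (p : List Int) (hinv : gridInv kept grid) :
    gridHit grid (pvx p) (pvy p) (PySem.Int.floordiv (pvx p) 20) (PySem.Int.floordiv (pvy p) 20)
      = kept.any (fun q => conf p q) := by
  rcases hinv with ⟨h1, h2⟩
  rw [Bool.eq_iff_iff]
  unfold gridHit
  simp only [List.any_eq_true]
  constructor
  · rintro ⟨d, hd, hmatch⟩
    cases hq : PySem.Dict.get? grid (PySem.Int.floordiv (pvx p) 20 + d.1, PySem.Int.floordiv (pvy p) 20 + d.2) with
    | none => rw [hq] at hmatch; simp at hmatch
    | some q =>
      rw [hq] at hmatch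
      obtain ⟨hk, _⟩ := h2 _ _ hq
      exact ⟨q, hk, hmatch⟩
  · rintro ⟨q, hq, hc⟩
    have hget := h1 q hq
    have hc' := hc
    unfold conf at hc'
    simp only [Bool.and_eq_true, decide_eq_true_eq] at hc'
    have hx := floordiv_near (pvx p) (pvx q) hc'.1
    have hy := floordiv_near (pvy p) (pvy q) hc'.2
    refine ⟨(PySem.Int.floordiv (pvx q) 20 - PySem.Int.floordiv (pvx p) 20,
             PySem.Int.floordiv (pvy q) 20 - PySem.Int.floordiv (pvy p) 20), ?_, ?_⟩
    · simp only [PySem.Int.floordiv_eq_ediv_of_pos (show (0:Int) < 20 by omega)] at hx hy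
      rcases hx with hx' | hx' | hx' <;> rcases hy with hy' | hy' | hy' <;>
        simp [pvNbrs, hx', hy']
    · have hcell : (PySem.Int.floordiv (pvx p) 20 +
          (PySem.Int.floordiv (pvx q) 20 - PySem.Int.floordiv (pvx p) 20),
          PySem.Int.floordiv (pvy p) 20 +
          (PySem.Int.floordiv (pvy q) 20 - PySem.Int.floordiv (pvy p) 20)) = cellOf q := by
        unfold cellOf
        simp only [Prod.mk.injEq]
        constructor <;> ring
      rw [hcell, hget]
      unfold conf at hc
      exact hc

theorem elimAltLoop_eq_greedy (rest kept : List (List Int)) (grid : PySem.Dict (Int × Int) (List Int))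
    (hinv : gridInv kept grid) : elimAltLoop rest kept grid = gGreedy kept rest := by
  induction rest generalizing kept grid with
  | nil => rfl
  | cons p rest ih =>
    simp only [elimAltLoop, gGreedy]
    rw [gridHit_eq_any kept grid p hinv]
    by_cases hany : kept.any (fun q => conf p q) = true
    · simp only [hany, if_true]
      exact ih kept grid hinv
    · have hany' : kept.any (fun q => conf p q) = false := by
        simpa using hany
      simp only [hany', if_false, Bool.false_eq_true]
      apply ih
      rcases hinv with ⟨h1, h2⟩
      constructor
      · intro q hqmem
        rcases List.mem_append.mp hqmem with hqk | hqp
        · have hne : cellOf q ≠ cellOf p := by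
            intro heq
            have hcp : conf p q = true := by
              unfold cellOf at heq
              have hex : PySem.Int.floordiv (pvx q) 20 = PySem.Int.floordiv (pvx p) 20 := by
                have := congrArg Prod.fst heq; simpa using this
              have hey : PySem.Int.floordiv (pvy q) 20 = PySem.Int.floordiv (pvy p) 20 := by
                have := congrArg Prod.snd heq; simpa using this
              rw [PySem.Int.floordiv_eq_ediv_of_pos (by omega), PySem.Int.floordiv_eq_ediv_of_pos (by omega)] at hex hey
              unfold conf
              simp only [Bool.and_eq_true, decide_eq_true_eq]
              constructor <;> [rw [abs_le]; rw [abs_le]] <;> omega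
            have : kept.any (fun q => conf p q) = true := List.any_eq_true.mpr ⟨q, hqk, hcp⟩
            rw [hany'] at this; exact Bool.false_ne_true this
          show (PySem.Dict.insert grid (cellOf p) p).get? (cellOf q) = some q
          rw [PySem.Dict.get?_insert_of_ne _ _ hne]
          exact h1 q hqk
        · have hqp' : q = p := by simpa using hqp
          subst hqp'
          exact PySem.Dict.get?_insert_self _ _ _
      · intro c q hget
        show q ∈ kept ++ [p] ∧ c = cellOf q
        rw [show (PySem.Int.floordiv (pvx p) 20, PySem.Int.floordiv (pvy p) 20) = cellOf p from rfl,
            PySem.Dict.get?_insert] at hget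
        by_cases hcp : c = cellOf p
        · rw [if_pos hcp] at hget
          cases hget
          exact ⟨List.mem_append.mpr (Or.inr (by simp)), hcp⟩
        · rw [if_neg hcp] at hget
          obtain ⟨hk, hc⟩ := h2 _ _ hget
          exact ⟨List.mem_append.mpr (Or.inl hk), hc⟩

-- ---- A-side: the scan/remove passes compute the greedy filter ----

-- erasing (by value) an element of a ≤-sorted list removes it at its position
theorem all_eq_append (T P : List (List Int)) (q : List Int) (h : ∀ y ∈ P, y = q) :
    P ++ q :: T = q :: (P ++ T) := by
  induction P with
  | nil => rfl
  | cons y P ih =>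
    have hy : y = q := h y (by simp)
    subst hy
    have := ih (fun z hz => h z (by simp [hz]))
    simp only [List.cons_append, this]

theorem erase_sorted_middle (P T : List (List Int)) (q : List Int)
    (hp : (P ++ q :: T).Pairwise (· ≤ ·)) : (P ++ q :: T).erase q = P ++ T := by
  induction P with
  | nil => simp
  | cons x P ih =>
    by_cases hx : x = q
    · subst hx
      rw [List.cons_append, List.erase_cons_head]
      have hall : ∀ y ∈ P, y = x := by
        intro y hy
        have h1 : x ≤ y := (List.pairwise_cons.mp hp).1 y (by simp [hy])
        have h2 : y ≤ x := by
          have hpp := (List.pairwise_cons.mp hp).2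
          have := (List.pairwise_append.mp hpp).2.2 y hy x (by simp)
          exact this
        exact le_antisymm h2 h1
      exact all_eq_append T P x hall
    · rw [List.cons_append, List.erase_cons_tail (by simpa using hx), List.cons_append]
      rw [ih (by exact (List.pairwise_cons.mp hp).2)]

-- the scan output is a sublist of the index range
theorem elimScan_sublist (locs : List (List Int)) (pi_ : List Int) (js : List Int) :
    (elimScan locs pi_ js).Sublist js := by
  induction js with
  | nil => simp [elimScan]
  | cons j js ih =>
    simp only [elimScan]
    split_ifs with h1 h2 h3
    · exact ih.cons₂ j
    · exact ih.cons j
    · exact ih.cons j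
    · exact List.nil_sublist _

-- lex-sorted nonempty lists have monotone x-coordinates
theorem pvx_mono (a b : List Int) (h : a ≤ b) (ha : a ≠ []) : pvx a ≤ pvx b := by
  rcases lt_or_eq_of_le h with hlt | heq
  · cases a with
    | nil => exact absurd rfl ha
    | cons x xs =>
      cases b with
      | nil => exact absurd hlt (by simp)
      | cons y ys =>
        rcases List.cons_lt_cons_iff.mp hlt with h' | ⟨h', _⟩ <;>
          simp [pvx, PySem.List.pyGetD_zero_cons] <;> omega
  · subst heq; exact le_rfl

theorem conf_false_of_far (q r : List Int) (h : 20 < pvx q - pvx r) : conf q r = false := by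
  unfold conf
  have habs : ¬ (|pvx q - pvx r| ≤ 20) := by
    have := le_abs_self (pvx q - pvx r); omega
  simp [habs]

theorem pyGetD_middle (P T : List (List Int)) (q : List Int) :
    PySem.List.pyGetD (P ++ q :: T) (P.length : Int) [] = q := by
  rw [PySem.List.pyGetD_natCast, List.getD_eq_getElem?_getD,
      List.getElem?_append_right (le_refl P.length)]
  simp

theorem sorted_rev_of_pairwise_lt (l : List Int) (h : l.Pairwise (· < ·)) :
    PySem.List.sorted l (fun x => x) true = l.reverse := by
  apply PySem.List.sorted_rev_eq_of_perm_of_pairwise_gt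
  · exact List.reverse_perm l
  · rwa [List.pairwise_reverse]

theorem sorted_rev_cons (l : List Int) (a : Int) (h : l.Pairwise (· < ·))
    (hgt : ∀ x ∈ l, a < x) :
    PySem.List.sorted (a :: l) (fun x => x) true = l.reverse ++ [a] := by
  apply PySem.List.sorted_rev_eq_of_perm_of_pairwise_gt
  · refine (List.perm_append_comm).trans ?_
    simp
  · rw [List.pairwise_append]
    refine ⟨by rwa [List.pairwise_reverse], by simp, ?_⟩
    intro x hx y hy
    simp at hy; subst hy
    exact hgt x (by simpa using hx)

-- one outer iteration: pivot r just before R' eliminates exactly its 20-box conflicts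
theorem step_lemma (R' : List (List Int)) : ∀ (P : List (List Int)) (r : List Int),
    (P ++ R').Pairwise (· ≤ ·) → (∀ q ∈ R', r ≤ q) → 2 ≤ r.length → (∀ q ∈ R', 2 ≤ q.length) →
    elimRemove (P ++ R')
        (PySem.List.sorted
          (elimScan (P ++ R') r
            (PySem.List.pyRange (P.length : Int) ((P.length : Int) + (R'.length : Int)) 1))
          (fun x => x) true)
      = P ++ R'.filter (fun q => !conf q r) := by
  induction R' with
  | nil =>
    intro P r _ _ _ _
    rw [show PySem.List.pyRange (P.length : Int) ((P.length : Int) + (([] : List (List Int)).length : Int)) 1 = [] from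
        PySem.List.pyRange_one_eq_nil (by simp)]
    show elimRemove (P ++ []) (PySem.List.sorted (elimScan (P ++ []) r []) (fun x => x) true) = _
    rw [show elimScan (P ++ []) r [] = [] from rfl,
        (PySem.List.sorted_eq_nil_iff _ _ _).mpr rfl]
    rfl
  | cons q0 R'' ih =>
    intro P r hsort hr hrl hl
    have hq0 : PySem.List.pyGetD (P ++ q0 :: R'') (P.length : Int) [] = q0 := pyGetD_middle P R'' q0
    have hrange : PySem.List.pyRange (P.length : Int) ((P.length : Int) + ((q0 :: R'').length : Int)) 1
        = (P.length : Int) :: PySem.List.pyRange ((P.length : Int) + 1) (((P.length : Int) + 1) + (R''.length : Int)) 1 := by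
      have hb : (P.length : Int) + (((q0 :: R'').length : Nat) : Int)
          = ((P.length : Int) + 1) + ((R''.length : Nat) : Int) := by
        push_cast [List.length_cons]; ring
      rw [hb, PySem.List.pyRange_one_cons (by omega)]
    rw [hrange]
    have hsort' : ((P ++ [q0]) ++ R'').Pairwise (· ≤ ·) := by
      simp only [List.append_assoc, List.singleton_append]; exact hsort
    have ih' := ih (P ++ [q0]) r hsort'
      (fun q hq => hr q (List.mem_cons_of_mem _ hq)) hrl
      (fun q hq => hl q (List.mem_cons_of_mem _ hq))
    simp only [List.append_assoc, List.singleton_append, List.length_append,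
      List.length_cons, List.length_nil, Nat.cast_add, Nat.cast_one,
      zero_add] at ih'
    -- names for the tail scan
    have hsub := elimScan_sublist (P ++ q0 :: R'') r
      (PySem.List.pyRange ((P.length : Int) + 1) (((P.length : Int) + 1) + (R''.length : Int)) 1)
    have hsclt : (elimScan (P ++ q0 :: R'') r
        (PySem.List.pyRange ((P.length : Int) + 1) (((P.length : Int) + 1) + (R''.length : Int)) 1)).Pairwise (· < ·) :=
      List.Pairwise.sublist hsub (PySem.List.pairwise_lt_pyRange_one _ _)
    have hscgt : ∀ x ∈ elimScan (P ++ q0 :: R'') r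
        (PySem.List.pyRange ((P.length : Int) + 1) (((P.length : Int) + 1) + (R''.length : Int)) 1),
        (P.length : Int) < x := by
      intro x hx
      have hxm := (PySem.List.mem_pyRange_one).mp (hsub.subset hx)
      omega
    -- q0 is not [] and r is not []
    have hq0ne : q0 ≠ [] := by
      have := hl q0 (by simp)
      intro hc; subst hc; simp at this
    have hrne : r ≠ [] := by
      intro hc; subst hc; simp at hrl
    simp only [elimScan, hq0]
    by_cases hdx : |pvx q0 - pvx r| ≤ 20 <;> by_cases hdy : |pvy q0 - pvy r| ≤ 20
    · -- conflict: q0's index is collected and q0 removed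
      simp only [if_pos hdx, if_pos hdy]
      rw [sorted_rev_cons _ _ hsclt hscgt]
      rw [sorted_rev_of_pairwise_lt _ hsclt] at ih'
      unfold elimRemove at ih' ⊢
      rw [List.foldl_append, ih']
      simp only [List.foldl_cons, List.foldl_nil]
      rw [pyGetD_middle P (R''.filter (fun q => !conf q r)) q0]
      rw [PySem.List.remove?_eq_some_erase _ q0 (by simp)]
      simp only [Option.getD_some]
      have hXsub : (P ++ q0 :: R''.filter (fun q => !conf q r)).Sublist (P ++ q0 :: R'') :=
        List.Sublist.append_left ((List.filter_sublist).cons₂ q0) P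
      rw [erase_sorted_middle P _ q0 (List.Pairwise.sublist hXsub hsort)]
      have hcq0 : conf q0 r = true := by simp [conf, hdx, hdy]
      simp [hcq0]
    · -- x close, y far: no conflict, scan continues
      simp only [if_pos hdx, if_neg hdy]
      rw [ih']
      have hcq0 : conf q0 r = false := by simp [conf, hdy]
      simp [hcq0]
    · -- x far, y close: no conflict, scan continues
      simp only [if_neg hdx, if_pos hdy]
      rw [ih']
      have hcq0 : conf q0 r = false := by simp [conf, hdx]
      simp [hcq0]
    · -- both far: break, everything later is x-far as well
      simp only [if_neg hdx, if_neg hdy]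
      rw [(PySem.List.sorted_eq_nil_iff _ _ _).mpr rfl]
      have hxq0 : 20 < pvx q0 - pvx r := by
        have hle := pvx_mono r q0 (hr q0 (by simp)) hrne
        rcases abs_cases (pvx q0 - pvx r) with ⟨h1, h2⟩ | ⟨h1, h2⟩ <;> omega
      have hcq0 : conf q0 r = false := conf_false_of_far q0 r hxq0
      have hfilt : R''.filter (fun q => !conf q r) = R'' := by
        apply List.filter_eq_self.mpr
        intro q hq
        have hq0q : q0 ≤ q :=
          (List.pairwise_cons.mp (List.pairwise_append.mp hsort).2.1).1 q hq
        have hle := pvx_mono q0 q hq0q hq0ne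
        rw [conf_false_of_far q r (by omega)]
        rfl
      show P ++ q0 :: R'' = P ++ (q0 :: R'').filter (fun q => !conf q r)
      simp [hcq0, hfilt]

-- a step whose pivot-- a step whose pivot index is past the end does nothing
theorem elimStep_id (L : List (List Int)) (i : Int) (h : PySem.List.len L ≤ i + 1) :
    elimStep L i = L := by
  unfold elimStep
  rw [PySem.List.pyRange_one_eq_nil h]
  rfl

theorem foldl_elimStep_id (K : List (List Int)) (a N : Int) (h : (K.length : Int) ≤ a) :
    (PySem.List.pyRange a N 1).foldl elimStep K = K := by
  by_cases hN : N ≤ a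
  · rw [PySem.List.pyRange_one_eq_nil hN]; rfl
  · rw [not_le] at hN
    rw [PySem.List.pyRange_one_cons (by omega)]
    simp only [List.foldl_cons]
    rw [elimStep_id K a (by simp only [PySem.List.len_eq]; omega)]
    exact foldl_elimStep_id K (a + 1) N (by omega)
termination_by (N - a).toNat
decreasing_by omega

-- dropping the elements that conflict with a kept point does not change the greedy result
theorem greedy_filter_skip (rest kept : List (List Int)) (r : List Int) (hr : r ∈ kept) :
    gGreedy kept (rest.filter (fun q => !conf q r)) = gGreedy kept rest := by
  induction rest generalizing kept with
  | nil => rfl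
  | cons q rest ih =>
    by_cases hc : conf q r = true
    · have hany : kept.any (fun t => conf q t) = true := List.any_eq_true.mpr ⟨r, hr, hc⟩
      simp only [List.filter_cons, hc, Bool.not_true, gGreedy, hany, if_true]
      exact ih kept hr
    · have hc' : conf q r = false := by simpa using hc
      simp only [List.filter_cons, hc', Bool.not_false, if_true, gGreedy]
      by_cases hany : kept.any (fun t => conf q t) = true
      · simp only [hany, if_true]
        exact ih kept hr
      · have hany' : kept.any (fun t => conf q t) = false := by simpa using hany
        simp only [hany', Bool.false_eq_true, if_false]
        exact ih (kept ++ [q]) (by simp [hr])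

-- main outer induction
theorem outer_lemma (n : Nat) : ∀ (R K : List (List Int)) (N : Int),
    R.length ≤ n →
    (K ++ R).Pairwise (· ≤ ·) →
    (∀ l ∈ K ++ R, 2 ≤ l.length) →
    (∀ r ∈ R, ∀ q ∈ K, conf r q = false) →
    (K.length : Int) + (R.length : Int) ≤ N + 1 →
    (PySem.List.pyRange (K.length : Int) N 1).foldl elimStep (K ++ R) = gGreedy K R := by
  induction n with
  | zero =>
    intro R K N hsize _ _ _ _
    have hR : R = [] := List.length_eq_zero_iff.mp (Nat.le_zero.mp hsize)
    subst hR
    rw [List.append_nil]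
    exact foldl_elimStep_id K _ N le_rfl
  | succ n ih =>
    intro R K N hsize hsort hlen hclean hN
    cases R with
    | nil =>
      rw [List.append_nil]
      exact foldl_elimStep_id K _ N le_rfl
    | cons r R' =>
      have hanyK : K.any (fun q => conf r q) = false := by
        rw [List.any_eq_false]
        intro q hq
        simp [hclean r (by simp) q hq]
      by_cases hK : N ≤ (K.length : Int)
      · rw [PySem.List.pyRange_one_eq_nil hK]
        have hR' : R' = [] := by
          apply List.length_eq_zero_iff.mp
          have : ((r :: R').length : Int) ≤ 1 := by omega
          push_cast [List.length_cons] at this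
          omega
        subst hR'
        simp only [List.foldl_nil, gGreedy, hanyK, Bool.false_eq_true, if_false]
      · have hKN : (K.length : Int) < N := lt_of_not_ge hK
        rw [PySem.List.pyRange_one_cons hKN]
        simp only [List.foldl_cons]
        have hstep : elimStep (K ++ r :: R') (K.length : Int)
            = (K ++ [r]) ++ R'.filter (fun q => !conf q r) := by
          unfold elimStep
          have hlenL : PySem.List.len (K ++ r :: R')
              = ((K ++ [r]).length : Int) + ((R'.length : Nat) : Int) := by
            simp only [PySem.List.len_eq, List.length_append, List.length_cons,
              List.length_nil]
            push_cast; ring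
          rw [hlenL, pyGetD_middle K R' r]
          have harg : (K.length : Int) + 1 = (((K ++ [r]).length : Nat) : Int) := by
            push_cast [List.length_append, List.length_cons, List.length_nil]; ring
          rw [harg, show (K ++ r :: R') = ((K ++ [r]) ++ R') by simp]
          exact step_lemma R' (K ++ [r]) r
            (by simpa using hsort)
            (fun q hq => (List.pairwise_cons.mp (List.pairwise_append.mp hsort).2.1).1 q hq)
            (hlen r (by simp))
            (fun q hq => hlen q (by simp [hq]))
        rw [hstep]
        have hcast : (K.length : Int) + 1 = (((K ++ [r]).length : Nat) : Int) := by
          push_cast [List.length_append, List.length_cons, List.length_nil]; ring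
        rw [hcast]
        have hsub2 : ((K ++ [r]) ++ R'.filter (fun q => !conf q r)).Sublist (K ++ r :: R') := by
          simp only [List.append_assoc, List.singleton_append]
          exact List.Sublist.append_left ((List.filter_sublist).cons₂ r) K
        rw [ih (R'.filter (fun q => !conf q r)) (K ++ [r]) N
          (le_trans (List.length_filter_le _ _) (Nat.succ_le_succ_iff.mp hsize))
          (List.Pairwise.sublist hsub2 hsort)
          (fun l hl' => hlen l (hsub2.subset hl'))
          (by
            intro q hq t ht
            rcases List.mem_append.mp ht with htK | htr
            · exact hclean q (List.mem_cons_of_mem _ (List.mem_of_mem_filter hq)) t htK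
            · have htr' : t = r := by simpa using htr
              subst htr'
              have := List.of_mem_filter hq
              simpa using this)
          (by
            have hfl := List.length_filter_le (fun q => !conf q r) R'
            push_cast [List.length_append, List.length_cons, List.length_nil] at *
            omega)]
        rw [greedy_filter_skip R' (K ++ [r]) r (by simp)]
        simp [gGreedy, hanyK]

-- on lists of at most one point A's outer loop does nothing
theorem small_case (s : List (List Int)) (h : s.length ≤ 1) :
    (PySem.List.pyRange 0 (PySem.List.len s - 1) 1).foldl elimStep s = s := by
  match s with
  | [] =>
    rw [PySem.List.pyRange_one_eq_nil (by simp [PySem.List.len_eq])]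
    rfl
  | [p] =>
    rw [PySem.List.pyRange_one_eq_nil (by simp [PySem.List.len_eq])]
    rfl
  | p :: q :: t => simp at h

-- ===== VERDICT (by name: the statement is the Claim_ definition above) =====
theorem eliminate_locs_spec : Claim_equal_eliminate_locs := by
  unfold Claim_equal_eliminate_locs
  intro locs _ hpre
  unfold Spec_eliminate_locs eliminate_locs eliminate_locs_alt
  by_cases hsl : PySem.List.len (PySem.List.sorted locs (fun x => x) false) ≤ 1
  · rw [if_pos hsl]
    exact small_case _ (by simpa [PySem.List.len_eq] using hsl)
  · rw [if_neg hsl]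
    have hempty : gridInv [] PySem.Dict.empty := by
      constructor
      · intro q hq; simp at hq
      · intro c q hget; rw [PySem.Dict.get?_empty] at hget; cases hget
    rw [elimAltLoop_eq_greedy _ [] PySem.Dict.empty hempty]
    have hsort : (PySem.List.sorted locs (fun x => x) false).Pairwise (· ≤ ·) := by
      have h := PySem.List.sorted_pairwise locs (fun x : List Int => x)
      convert h using 2
    have hlen : ∀ l ∈ locs, 2 ≤ l.length := by
      rcases hpre with h | h
      · exfalso
        apply hsl
        simp only [PySem.List.len_eq, PySem.List.length_sorted]
        omega
      · exact h
    have h := outer_lemma (PySem.List.sorted locs (fun x => x) false).length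
      (PySem.List.sorted locs (fun x => x) false) []
      (PySem.List.len (PySem.List.sorted locs (fun x => x) false) - 1)
      le_rfl
      (by simpa using hsort)
      (by
        intro l hl
        simp only [List.nil_append] at hl
        exact hlen l ((PySem.List.mem_sorted _ _ _ _).mp hl))
      (by intro r _ q hq; simp at hq)
      (by simp only [PySem.List.len_eq, List.length_nil, Nat.cast_zero]; omega)
    simpa using h
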